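-- pv_equiv track=rewrite | github.com/dassh-dev/dassh | dassh/hotspot.py | _count_expr
-- ===== SOURCE A (Python) =====
-- def _count_expr(hcf_table_str):
--     """Count number of user-provided expressions in table"""
--     n_expr = 1
--     while True:
--         tag = hcf_table_str.find('*' * n_expr + ',')
--         if tag == -1:
--             break
--         elif n_expr > 100:
--             raise ValueError('Too many expressions! 100 and counting...')
--         else:
--             n_expr += 1
--     # The last one will count too far, so subtract it before return
--     return n_expr - 1
-- ===== SOURCE B (Python) =====
-- def _count_expr(hcf_table_str):
--     """Count number of user-provided expressions in table"""
--     run = 0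
--     best = 0
--     for ch in hcf_table_str:
--         if ch == '*':
--             run += 1
--         else:
--             if ch == ',' and run > best:
--                 best = run
--             run = 0
--     if best > 100:
--         raise ValueError('Too many expressions! 100 and counting...')
--     return best
-- ===== Notes on version B (the rewrite author's own statement) =====
-- stated objective: alternative
-- what changed: Replaces the loop that repeatedly grows a star-pattern string and rescans the whole input with str.find by a single left-to-right scan that keeps a running count of consecutive stars and records the maximum seen at each comma.
import Mathlib
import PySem

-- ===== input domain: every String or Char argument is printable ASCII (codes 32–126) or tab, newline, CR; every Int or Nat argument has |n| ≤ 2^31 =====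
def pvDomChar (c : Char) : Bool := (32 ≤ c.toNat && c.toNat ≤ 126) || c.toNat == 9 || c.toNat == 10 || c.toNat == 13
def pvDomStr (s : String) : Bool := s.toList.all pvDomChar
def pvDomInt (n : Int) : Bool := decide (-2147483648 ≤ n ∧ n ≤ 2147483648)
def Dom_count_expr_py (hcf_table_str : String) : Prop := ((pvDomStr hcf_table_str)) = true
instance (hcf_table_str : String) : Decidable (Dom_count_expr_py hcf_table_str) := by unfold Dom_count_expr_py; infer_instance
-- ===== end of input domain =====

-- B replaces A's repeated pattern-growing str.find loop by one linear scan tracking the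
-- running star count and its maximum at commas (objective: alternative, one pass over the string).
-- Both programs raise ValueError (same message) when more than 100 stars immediately precede
-- a comma; Pre_ excludes exactly those inputs.

-- ===== PORT A =====
-- the loop body of A: find the pattern of n stars followed by a comma; on -1 return n-1; on n > 100 Python raises
-- ValueError (modelled as 0, excluded by Pre_); else n += 1 and loop again.
def aLoop (s : List Char) (n : Nat) : Int :=
  if PySem.Chars.find s (List.replicate n '*' ++ [',']) = -1 then (n : Int) - 1
  else if _h : 100 < n then 0   -- raise ValueError: outside Pre_
  else aLoop s (n + 1)
termination_by 101 - n
decreasing_by omega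

-- exact: Str.find on strings is Chars.find on .toList (PySem.Str.find_eq)
def count_expr_py (hcf_table_str : String) : Int := aLoop hcf_table_str.toList 1

-- ===== PORT B =====
-- one fold step of B's scan: state = (run, best)
def bStep (st : Nat × Nat) (c : Char) : Nat × Nat :=
  if c = '*' then (st.1 + 1, st.2)
  else (0, if c = ',' ∧ st.2 < st.1 then st.1 else st.2)

def count_expr_py_alt (hcf_table_str : String) : Int :=
  let best := (hcf_table_str.toList.foldl bStep (0, 0)).2
  if best > 100 then 0   -- raise ValueError: outside Pre_
  else (best : Int)

-- ===== PRECONDITION & SPEC =====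
-- Pre_ excludes exactly the inputs on which A (and B alike) raises ValueError:
-- strings containing 101 consecutive stars immediately followed by a comma.
def Pre_count_expr_py (hcf_table_str : String) : Prop :=
  ¬ (List.replicate 101 '*' ++ [',']) <:+: hcf_table_str.toList
instance (hcf_table_str : String) : Decidable (Pre_count_expr_py hcf_table_str) := by
  unfold Pre_count_expr_py; infer_instance

def pvWitness_count_expr_py : String := "a *, **,b"

def Spec_count_expr_py (hcf_table_str : String) (out : Int) : Prop := out = count_expr_py_alt hcf_table_str
instance (hcf_table_str : String) (out : Int) : Decidable (Spec_count_expr_py hcf_table_str out) := by unfold Spec_count_expr_py; infer_instance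

-- ===== CLAIM (what is proved, stated in full; the proofs are below) =====
def Claim_equal_count_expr_py : Prop := ∀ (hcf_table_str : String), Dom_count_expr_py hcf_table_str → Pre_count_expr_py hcf_table_str → Spec_count_expr_py hcf_table_str (count_expr_py hcf_table_str)

-- ===== LEMMAS AND PROOFS =====

-- reference function: max number of consecutive '*' immediately before a ',' in l, where
-- `run` stars are already pending from the left context
def mc (run : Nat) : List Char → Nat
  | [] => 0
  | c :: cs => if c = '*' then mc (run + 1) cs else if c = ',' then max run (mc 0 cs) else mc 0 cs

theorem mc_pos_comma : ∀ (l : List Char) (run : Nat), 0 < mc run l → ',' ∈ l := by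
  intro l
  induction l with
  | nil => intro run h; simp [mc] at h
  | cons c cs ih =>
    intro run h
    simp only [mc] at h
    split_ifs at h with h1 h2
    · exact List.mem_cons_of_mem _ (ih _ h)
    · simp [h2]
    · exact List.mem_cons_of_mem _ (ih _ h)

theorem fold_bStep : ∀ (l : List Char) (run best : Nat),
    (l.foldl bStep (run, best)).2 = max best (mc run l) := by
  intro l
  induction l with
  | nil => intro run best; simp [mc]
  | cons c cs ih =>
    intro run best
    rw [List.foldl_cons]
    by_cases h1 : c = '*'
    · subst h1
      simp only [bStep]
      have hmc : mc run ('*' :: cs) = mc (run + 1) cs := by simp [mc]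
      rw [hmc]
      exact ih (run + 1) best
    · by_cases hc : c = ','
      · subst hc
        simp only [bStep, if_neg h1]
        have hmc : mc run (',' :: cs) = max run (mc 0 cs) := by simp [mc]
        rw [hmc]
        split_ifs with hP
        · rw [ih]
          rcases hP with ⟨-, hP⟩
          omega
        · rw [ih]
          simp only [not_and] at hP
          have : ¬ best < run := fun h => hP (by trivial) h
          omega
      · simp only [bStep, if_neg h1]
        have hmc : mc run (c :: cs) = mc 0 cs := by simp [mc, h1, hc]
        rw [hmc, if_neg (by intro hx; exact hc hx.1), ih]

-- prefix occurrences of '*'*k + ',' in '*'*run ++ c::cs end at c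
theorem pat_prefix : ∀ (k run : Nat) (c : Char) (cs : List Char), c ≠ '*' →
    (List.replicate k '*' ++ [','] <+: List.replicate run '*' ++ c :: cs) →
    c = ',' ∧ k ≤ run := by
  intro k
  induction k with
  | zero =>
    intro run c cs hc h
    cases run with
    | zero =>
      simp only [List.replicate_zero, List.nil_append] at h
      obtain ⟨t, ht⟩ := h
      rw [List.singleton_append, List.cons_eq_cons] at ht
      exact ⟨ht.1.symm, Nat.zero_le _⟩
    | succ r =>
      obtain ⟨t, ht⟩ := h
      simp only [List.replicate_zero, List.nil_append,
        List.replicate_succ, List.cons_append, List.cons_eq_cons] at ht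
      exact absurd ht.1 (by decide)
  | succ k ih =>
    intro run c cs hc h
    obtain ⟨t, ht⟩ := h
    cases run with
    | zero =>
      simp only [List.replicate_succ, List.replicate_zero, List.nil_append, List.cons_append,
        List.cons_eq_cons] at ht
      exact absurd ht.1.symm hc
    | succ r =>
      simp only [List.replicate_succ, List.cons_append, List.cons_eq_cons] at ht
      have := ih r c cs hc ⟨t, by rw [List.append_assoc] at ht ⊢; exact ht.2⟩
      exact ⟨this.1, by omega⟩

theorem pat_infix_split : ∀ (run k : Nat) (c : Char) (cs : List Char), c ≠ '*' →
    (List.replicate k '*' ++ [','] <:+: List.replicate run '*' ++ c :: cs) →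
    (c = ',' ∧ k ≤ run) ∨ (List.replicate k '*' ++ [','] <:+: cs) := by
  intro run
  induction run with
  | zero =>
    intro k c cs hc h
    simp only [List.replicate_zero, List.nil_append] at h
    rcases (List.infix_cons_iff).mp h with h | h
    · exact Or.inl (pat_prefix k 0 c cs hc (by simpa using h))
    · exact Or.inr h
  | succ r ih =>
    intro k c cs hc h
    rw [List.replicate_succ, List.cons_append] at h
    rcases (List.infix_cons_iff).mp h with h | h
    · have := pat_prefix k (r + 1) c cs hc (by rw [List.replicate_succ, List.cons_append]; exact h)
      exact Or.inl this
    · rcases ih k c cs hc h with ⟨h1, h2⟩ | h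
      · exact Or.inl ⟨h1, by omega⟩
      · exact Or.inr h

theorem pat_infix_iff : ∀ (l : List Char) (run k : Nat),
    (List.replicate k '*' ++ [','] <:+: List.replicate run '*' ++ l) ↔
    (k ≤ mc run l ∧ ',' ∈ l) := by
  intro l
  induction l with
  | nil =>
    intro run k
    simp only [List.append_nil, List.not_mem_nil, and_false, iff_false]
    intro h
    have hm : ',' ∈ List.replicate run '*' := h.subset (by simp)
    exact absurd (List.eq_of_mem_replicate hm) (by decide)
  | cons c cs ih =>
    intro run k
    by_cases hc : c = '*'
    · subst hc
      have hrw : List.replicate run '*' ++ '*' :: cs = List.replicate (run + 1) '*' ++ cs := by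
        rw [List.replicate_succ']; simp
      rw [hrw, ih (run + 1) k]
      have hmc : mc run ('*' :: cs) = mc (run + 1) cs := by simp [mc]
      have hmm : (',' ∈ '*' :: cs) ↔ ',' ∈ cs := by
        rw [List.mem_cons]
        exact ⟨fun h => h.elim (fun h => absurd h (by decide)) id, Or.inr⟩
      rw [hmc, hmm]
    · by_cases hcm : c = ','
      · subst hcm
        have hmc : mc run (',' :: cs) = max run (mc 0 cs) := by simp [mc]
        rw [hmc]
        constructor
        · intro h
          rcases pat_infix_split run k ',' cs hc h with ⟨_, h2⟩ | h
          · exact ⟨by omega, by simp⟩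
          · have := (ih 0 k).mp (by simpa using h)
            exact ⟨by omega, by simp⟩
        · rintro ⟨hk, -⟩
          by_cases hkr : k ≤ run
          · refine ⟨List.replicate (run - k) '*', cs, ?_⟩
            simp only [← List.append_assoc, ← List.replicate_add]
            rw [show run - k + k = run by omega]
            simp
          · have hk' : k ≤ mc 0 cs := by omega
            have hpos : 0 < mc 0 cs := by omega
            have hmem' : ',' ∈ cs := mc_pos_comma cs 0 hpos
            have h := (ih 0 k).mpr ⟨hk', hmem'⟩
            simp only [List.replicate_zero, List.nil_append] at h
            exact h.trans (List.IsSuffix.isInfix ⟨List.replicate run '*' ++ [','], by simp⟩)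
      · have hmc : mc run (c :: cs) = mc 0 cs := by
          simp only [mc, if_neg hc, if_neg hcm]
        have hmm : (',' ∈ c :: cs) ↔ ',' ∈ cs := by
          rw [List.mem_cons]
          exact ⟨fun h => h.elim (fun h => absurd h.symm hcm) id, Or.inr⟩
        rw [hmc, hmm]
        constructor
        · intro h
          rcases pat_infix_split run k c cs hc h with ⟨h1, -⟩ | h
          · exact absurd h1 hcm
          · exact (ih 0 k).mp (by simpa using h)
        · rintro ⟨hk, hmem'⟩
          have h := (ih 0 k).mpr ⟨hk, hmem'⟩
          simp only [List.replicate_zero, List.nil_append] at h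
          exact h.trans (List.IsSuffix.isInfix ⟨List.replicate run '*' ++ [c], by simp⟩)

theorem pat_infix_iff' (l : List Char) (k : Nat) :
    (List.replicate k '*' ++ [','] <:+: l) ↔ (k ≤ mc 0 l ∧ ',' ∈ l) := by
  have := pat_infix_iff l 0 k
  simpa using this

theorem mc_le_100 (l : List Char) (hpre : ¬ (List.replicate 101 '*' ++ [',']) <:+: l) :
    mc 0 l ≤ 100 := by
  rw [pat_infix_iff'] at hpre
  by_cases hmem : ',' ∈ l
  · have h101 : ¬ 101 ≤ mc 0 l := fun h => hpre ⟨h, hmem⟩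
    omega
  · have : ¬ 0 < mc 0 l := fun h => hmem (mc_pos_comma l 0 h)
    omega

theorem aLoop_eq (l : List Char) : ∀ (fuel n : Nat), 101 - n ≤ fuel → 1 ≤ n → n ≤ 101 →
    n - 1 ≤ mc 0 l → mc 0 l ≤ 100 → aLoop l n = (mc 0 l : Int) := by
  intro fuel
  induction fuel with
  | zero =>
    intro n hf h1 h101 hlo hhi
    have hn : n = 101 := by omega
    subst hn
    rw [aLoop]
    have hfind : PySem.Chars.find l (List.replicate 101 '*' ++ [',']) = -1 := by
      rw [PySem.Chars.find_eq_neg_one_iff, pat_infix_iff']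
      exact fun h => absurd h.1 (by omega)
    rw [if_pos hfind]
    have hm : mc 0 l = 100 := by omega
    rw [hm]; norm_num
  | succ f ih =>
    intro n hf h1 h101 hlo hhi
    rw [aLoop]
    by_cases hfind : PySem.Chars.find l (List.replicate n '*' ++ [',']) = -1
    · rw [if_pos hfind]
      rw [PySem.Chars.find_eq_neg_one_iff, pat_infix_iff'] at hfind
      by_cases hmem : ',' ∈ l
      · have hlt : mc 0 l < n := by
          by_contra h
          exact hfind ⟨by omega, hmem⟩
        omega
      · have hz : ¬ 0 < mc 0 l := fun h => hmem (mc_pos_comma l 0 h)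
        omega
    · rw [if_neg hfind]
      have hinf := (PySem.Chars.find_ne_neg_one_iff _ _).mp hfind
      rw [pat_infix_iff'] at hinf
      have hn : ¬ 100 < n := by omega
      rw [dif_neg hn]
      exact ih (n + 1) (by omega) (by omega) (by omega) (by omega) hhi

-- ===== VERDICT (by name: the statement is the Claim_ definition above) =====
theorem count_expr_py_spec : Claim_equal_count_expr_py := by
  unfold Claim_equal_count_expr_py Spec_count_expr_py Pre_count_expr_py
  intro s _ hpre
  have hle := mc_le_100 s.toList hpre
  unfold count_expr_py count_expr_py_alt
  rw [aLoop_eq s.toList 101 1 (by omega) (by omega) (by omega) (by omega) hle]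
  rw [fold_bStep]
  simp only [Nat.zero_max]
  rw [if_neg (by omega)]
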